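-- pv_equiv track=rewrite | github.com/VergiKorea/VergiKorea_Appunti | 1o anno/python/esercizi05.py | intersect_dict
-- ===== SOURCE A (Python) =====
-- from typing import Any, Callable, List, Tuple
--
-- def intersect_dict(dictionaries: List[dict]) -> dict:
--     output = {}
--     for key in dictionaries[0]:
--         output_items = []
--         for dic in dictionaries:
--             if key in dic:
--                 output_items.append(dic[key])
--         if len(output_items) == len(dictionaries):
--             output[key] = output_items
--     return output
-- ===== SOURCE B (Python) =====
-- def intersect_dict(dictionaries):
--     common = set(dictionaries[0])
--     for d in dictionaries[1:]:
--         common &= set(d)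
--     return {k: [d[k] for d in dictionaries] for k in dictionaries[0] if k in common}
-- ===== Notes on version B (the rewrite author's own statement) =====
-- stated objective: idiomatic
-- what changed: Replaces A's per-key inner scan (collect values from each dict containing the key, then compare the count to len(dictionaries)) with a set-intersection reduction computing the common keys once, followed by a single dict-comprehension gather.
import Mathlib
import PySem

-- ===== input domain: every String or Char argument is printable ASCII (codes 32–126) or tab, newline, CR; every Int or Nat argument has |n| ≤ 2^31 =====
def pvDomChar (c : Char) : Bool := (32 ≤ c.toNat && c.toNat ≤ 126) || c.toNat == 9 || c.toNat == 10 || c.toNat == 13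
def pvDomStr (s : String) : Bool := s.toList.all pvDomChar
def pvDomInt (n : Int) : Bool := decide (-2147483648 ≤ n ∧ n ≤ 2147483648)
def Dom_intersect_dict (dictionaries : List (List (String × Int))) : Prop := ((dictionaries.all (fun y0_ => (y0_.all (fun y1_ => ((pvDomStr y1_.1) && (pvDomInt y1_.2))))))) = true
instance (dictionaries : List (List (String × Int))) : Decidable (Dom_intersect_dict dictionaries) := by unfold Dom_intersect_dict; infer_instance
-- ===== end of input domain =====

-- B replaces A's per-key membership/count loop with a set-intersection reduction
-- followed by one gather pass (idiomatic; same return value).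

-- ===== PORT A =====
def intersect_dict (dictionaries : List (List (String × Int))) : List (String × List Int) :=
  match dictionaries with
  | [] => []  -- Python: IndexError on dictionaries[0]; excluded by Pre_
  | l0 :: _ =>
    let dicts := dictionaries.map PySem.Dict.ofList
    ((PySem.Dict.ofList l0).keys.foldl
      (fun (output : PySem.Dict String (List Int)) key =>
        let output_items := dicts.foldl
          (fun (acc : List Int) dic =>
            if dic.contains key then acc ++ [dic.getD key 0] else acc) []
        if output_items.length = dicts.length then output.insert key output_items
        else output)
      PySem.Dict.empty).items

-- ===== PORT B =====
def intersect_dict_alt (dictionaries : List (List (String × Int))) : List (String × List Int) :=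
  match dictionaries with
  | [] => []  -- Python: IndexError on set(dictionaries[0]); excluded by Pre_
  | l0 :: ls =>
    let d0 := PySem.Dict.ofList l0
    let common := ls.foldl
      (fun (s : PySem.Set String) l => PySem.Set.inter s (PySem.Dict.ofList l).keys)
      (PySem.Set.ofList d0.keys)
    ((d0.keys.filter (fun k => PySem.Set.contains common k)).foldl
      (fun (out : PySem.Dict String (List Int)) k =>
        out.insert k (dictionaries.map (fun l => (PySem.Dict.ofList l).getD k 0)))
      PySem.Dict.empty).items

-- ===== PRECONDITION & SPEC =====
-- Pre_ excludes only the empty list, on which A raises IndexError.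
def Pre_intersect_dict (dictionaries : List (List (String × Int))) : Prop := dictionaries ≠ []
instance (dictionaries : List (List (String × Int))) : Decidable (Pre_intersect_dict dictionaries) := by unfold Pre_intersect_dict; infer_instance
def pvWitness_intersect_dict : (List (List (String × Int))) := [[("a", 1), ("b", 2)], [("b", 3)]]

def Spec_intersect_dict (dictionaries : List (List (String × Int))) (out : List (String × List Int)) : Prop := out = intersect_dict_alt dictionaries
instance (dictionaries : List (List (String × Int))) (out : List (String × List Int)) : Decidable (Spec_intersect_dict dictionaries out) := by unfold Spec_intersect_dict; infer_instance

-- ===== CLAIM (what is proved, stated in full; the proofs are below) =====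
def Claim_equal_intersect_dict : Prop := ∀ (dictionaries : List (List (String × Int))), Dom_intersect_dict dictionaries → Pre_intersect_dict dictionaries → Spec_intersect_dict dictionaries (intersect_dict dictionaries)

-- ===== LEMMAS AND PROOFS =====

-- A conditional-insert fold equals an unconditional fold over the filtered keys.
theorem foldl_ite_insert {p : String → Prop} [DecidablePred p]
    (v : String → List Int) :
    ∀ (keys : List String) (out : PySem.Dict String (List Int)),
      keys.foldl (fun out k => if p k then out.insert k (v k) else out) out
        = (keys.filter (fun k => decide (p k))).foldl
            (fun out k => out.insert k (v k)) out := by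
  intro keys
  induction keys with
  | nil => intro out; rfl
  | cons k ks ih =>
    intro out
    by_cases h : p k <;> simp [h, ih]

-- Membership in the intersection fold.
theorem mem_foldl_inter (k : String) :
    ∀ (ls : List (List (String × Int))) (s : PySem.Set String),
      (k ∈ ls.foldl
          (fun (s : PySem.Set String) l => PySem.Set.inter s (PySem.Dict.ofList l).keys) s)
        ↔ k ∈ s ∧ ∀ l ∈ ls, k ∈ (PySem.Dict.ofList l).keys := by
  intro ls
  induction ls with
  | nil => intro s; simp
  | cons l ls ih =>
    intro s
    simp [List.foldl_cons, ih, PySem.Set.mem_inter]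
    tauto

-- ===== VERDICT (by name: the statement is the Claim_ definition above) =====
theorem intersect_dict_spec : Claim_equal_intersect_dict := by
  intro dictionaries _ hpre
  unfold Spec_intersect_dict intersect_dict intersect_dict_alt
  match dictionaries with
  | [] => exact absurd rfl hpre
  | l0 :: ls =>
    simp only []
    set d0 := PySem.Dict.ofList l0 with hd0
    set dicts := (l0 :: ls).map PySem.Dict.ofList with hdicts
    set common := ls.foldl
      (fun (s : PySem.Set String) l => PySem.Set.inter s (PySem.Dict.ofList l).keys)
      (PySem.Set.ofList d0.keys) with hcommon
    -- per-key value A collects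
    have hitems : ∀ k : String,
        dicts.foldl (fun (acc : List Int) dic =>
          if dic.contains k then acc ++ [dic.getD k 0] else acc) []
        = (dicts.filter (fun dic => dic.contains k)).map (fun dic => dic.getD k 0) := by
      intro k
      simpa using PySem.List.foldl_append_if
        (fun dic : PySem.Dict String Int => dic.contains k)
        (fun dic => dic.getD k 0) dicts []
    -- A's condition ↔ every dict contains k
    have hcondA : ∀ k : String,
        ((dicts.filter (fun dic => dic.contains k)).length = dicts.length)
          ↔ ∀ d ∈ dicts, d.contains k := by
      intro k
      constructor
      · intro h d hd
        have := (List.length_filter_eq_length_iff).1 h d hd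
        simpa using this
      · intro h
        rw [List.filter_eq_self.2 (by intro d hd; simpa using h d hd)]
    -- B's condition ↔ every dict contains k
    have hcondB : ∀ k : String,
        (PySem.Set.contains common k = true) ↔ ∀ d ∈ dicts, d.contains k := by
      intro k
      rw [PySem.Set.contains_iff, hcommon, mem_foldl_inter, PySem.Set.mem_ofList]
      constructor
      · rintro ⟨h0, hrest⟩ d hd
        rw [hdicts] at hd
        simp only [List.map_cons, List.mem_cons] at hd
        rcases hd with rfl | hd
        · exact (PySem.Dict.contains_iff_mem_keys _ _).2 h0
        · obtain ⟨l, hl, rfl⟩ := List.mem_map.1 hd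
          exact (PySem.Dict.contains_iff_mem_keys _ _).2 (hrest l hl)
      · intro h
        refine ⟨?_, ?_⟩
        · exact (PySem.Dict.contains_iff_mem_keys _ _).1
            (h d0 (by rw [hdicts]; simp [hd0]))
        · intro l hl
          exact (PySem.Dict.contains_iff_mem_keys _ _).1
            (h (PySem.Dict.ofList l) (by rw [hdicts]; simp; right; exact ⟨l, hl, rfl⟩))
    congr 1
    rw [foldl_ite_insert (p := fun k =>
        (dicts.foldl (fun (acc : List Int) dic =>
          if dic.contains k then acc ++ [dic.getD k 0] else acc) []).length = dicts.length)]
    -- the filters pick the same keys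
    have hfilter :
        (d0.keys.filter (fun k => decide
          ((dicts.foldl (fun (acc : List Int) dic =>
            if dic.contains k then acc ++ [dic.getD k 0] else acc) []).length = dicts.length)))
        = d0.keys.filter (fun k => PySem.Set.contains common k) := by
      apply List.filter_congr
      intro k _
      rw [hitems k]
      by_cases h : ∀ d ∈ dicts, d.contains k
      · have h2 : k ∈ common := (PySem.Set.contains_iff _ _).1 ((hcondB k).2 h)
        simp [(hcondA k).2 h, h2]
      · have h1 : ¬ (dicts.filter (fun dic => dic.contains k)).length = dicts.length :=
          fun hc => h ((hcondA k).1 hc)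
        have h2 : k ∉ common :=
          fun hc => h ((hcondB k).1 ((PySem.Set.contains_iff _ _).2 hc))
        simp [h1, h2]
    rw [hfilter]
    -- on the surviving keys both folds insert the same value
    apply PySem.List.foldl_congr_mem
    intro acc k hk
    have hall : ∀ d ∈ dicts, d.contains k :=
      (hcondB k).1 (by simpa using (List.mem_filter.1 hk).2)
    rw [hitems k, List.filter_eq_self.2 (by intro d hd; simpa using hall d hd)]
    rw [hdicts, List.map_map]
    rfl
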